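-- pv_equiv track=rewrite | github.com/chaibo/code_interviews_python | 13-机器人的运动范围/question.py | moving_count2
-- ===== SOURCE A (Python) =====
-- def digit_sum(number):
--     sum = 0
--     while number > 0:
--         sum += number % 10
--         number //= 10
--
--     return sum
--
-- def moving_count2(threshold, rows, cols):
--     if (threshold < 0) or (rows <= 0) or (cols <= 0):
--         return 0
--
--     count = 0
--     for row in range(rows):
--         for col in range(cols):
--             if (digit_sum(row) + digit_sum(col)) <= threshold:
--                 count += 1
--
--     return count
-- ===== SOURCE B (Python) =====
-- def digit_sum(number):
--     sum = 0
--     while number > 0: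
--         sum += number % 10
--         number //= 10
--     return sum
--
-- def moving_count2(threshold, rows, cols):
--     if (threshold < 0) or (rows <= 0) or (cols <= 0):
--         return 0
--     # frequency of digit sums among row indices, and among column indices
--     row_freq = {}
--     for r in range(rows):
--         s = digit_sum(r)
--         row_freq[s] = row_freq.get(s, 0) + 1
--     col_freq = {}
--     for c in range(cols):
--         s = digit_sum(c)
--         col_freq[s] = col_freq.get(s, 0) + 1
--     count = 0
--     for sr, nr in row_freq.items():
--         for sc, nc in col_freq.items():
--             if sr + sc <= threshold:
--                 count += nr * nc
--     return count
-- ===== Notes on version B (the rewrite author's own statement) =====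
-- stated objective: faster
-- what changed: Instead of testing digit_sum(row)+digit_sum(col)<=threshold for every (row,col) pair, B builds digit-sum frequency dictionaries for the row and column indices in one pass each and sums nr*nc over the few (distinct digit-sum) pairs that satisfy the threshold.
import Mathlib
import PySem

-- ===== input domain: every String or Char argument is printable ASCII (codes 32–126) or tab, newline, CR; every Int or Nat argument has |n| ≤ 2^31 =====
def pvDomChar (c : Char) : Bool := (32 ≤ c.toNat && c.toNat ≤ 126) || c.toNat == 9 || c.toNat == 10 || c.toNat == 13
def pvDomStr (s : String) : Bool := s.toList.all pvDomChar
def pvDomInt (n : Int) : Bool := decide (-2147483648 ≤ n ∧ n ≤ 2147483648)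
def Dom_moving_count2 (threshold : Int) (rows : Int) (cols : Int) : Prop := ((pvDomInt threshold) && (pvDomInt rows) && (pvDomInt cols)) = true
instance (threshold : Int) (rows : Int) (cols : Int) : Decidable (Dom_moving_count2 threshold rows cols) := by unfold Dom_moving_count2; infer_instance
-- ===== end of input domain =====

-- B replaces the per-cell double loop by digit-sum frequency dictionaries for the
-- row and column index ranges, summing nr*nc over the qualifying digit-sum pairs (faster).

-- ===== PORT A =====
-- shared module helper digit_sum (identical in Source A and Source B): while number > 0 loop
def digit_sum_loop (sum : Int) (number : Int) : Int :=
  if number > 0 then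
    digit_sum_loop (sum + PySem.Int.mod number 10) (PySem.Int.floordiv number 10)
  else sum
termination_by number.toNat
decreasing_by
  rw [PySem.Int.floordiv_eq_ediv_of_pos (by norm_num)]
  omega

def digit_sum (number : Int) : Int := digit_sum_loop 0 number

def moving_count2 (threshold : Int) (rows : Int) (cols : Int) : Int :=
  if threshold < 0 ∨ rows ≤ 0 ∨ cols ≤ 0 then 0
  else
    (PySem.List.pyRange 0 rows 1).foldl
      (fun count row =>
        (PySem.List.pyRange 0 cols 1).foldl
          (fun count col =>
            if digit_sum row + digit_sum col ≤ threshold then count + 1 else count)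
          count)
      0

-- ===== PORT B =====
def moving_count2_alt (threshold : Int) (rows : Int) (cols : Int) : Int :=
  if threshold < 0 ∨ rows ≤ 0 ∨ cols ≤ 0 then 0
  else
    let rowFreq : PySem.Dict Int Int :=
      (PySem.List.pyRange 0 rows 1).foldl
        (fun d r => let s := digit_sum r; d.insert s (d.getD s 0 + 1)) PySem.Dict.empty
    let colFreq : PySem.Dict Int Int :=
      (PySem.List.pyRange 0 cols 1).foldl
        (fun d c => let s := digit_sum c; d.insert s (d.getD s 0 + 1)) PySem.Dict.empty
    rowFreq.items.foldl
      (fun count p =>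
        colFreq.items.foldl
          (fun count q =>
            if p.1 + q.1 ≤ threshold then count + p.2 * q.2 else count)
          count)
      0

-- ===== PRECONDITION & SPEC =====
def Spec_moving_count2 (threshold : Int) (rows : Int) (cols : Int) (out : Int) : Prop := out = moving_count2_alt threshold rows cols
instance (threshold : Int) (rows : Int) (cols : Int) (out : Int) : Decidable (Spec_moving_count2 threshold rows cols out) := by unfold Spec_moving_count2; infer_instance

-- ===== CLAIM (what is proved, stated in full; the proofs are below) =====
def Claim_equal_moving_count2 : Prop := ∀ (threshold : Int) (rows : Int) (cols : Int), Dom_moving_count2 threshold rows cols → Spec_moving_count2 threshold rows cols (moving_count2 threshold rows cols)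

-- ===== LEMMAS AND PROOFS =====

-- sum over a Nodup list of a function supported at the single member x
lemma sum_map_ite_single (s : List Int) (x : Int) (v : Int)
    (hs : s.Nodup) (hx : x ∈ s) :
    (s.map (fun k => if k = x then v else 0)).sum = v := by
  induction s with
  | nil => cases hx
  | cons a s ih =>
    rcases List.mem_cons.mp hx with h | h
    · subst h
      have hxs : x ∉ s := (List.nodup_cons.mp hs).1
      have : (s.map (fun k => if k = x then v else 0)) = s.map (fun _ => (0 : Int)) := by
        apply List.map_congr_left
        intro k hk
        have : k ≠ x := fun he => hxs (he ▸ hk)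
        simp [this]
      simp [this]
    · have hax : a ≠ x := fun he => (List.nodup_cons.mp hs).1 (he ▸ h)
      simp [hax, ih (List.nodup_cons.mp hs).2 h]

-- grouping: summing g over xs equals summing count·g over the distinct elements of xs
lemma group_sum (xs : List Int) (g : Int → Int) :
    ((PySem.Set.ofList xs).map (fun k => (xs.count k : Int) * g k)).sum = (xs.map g).sum := by
  induction xs using List.reverseRecOn with
  | nil => simp [PySem.Set.ofList_nil]
  | append_singleton xs x ih =>
    rw [PySem.Set.ofList_append_singleton]
    have hcount : ∀ k : Int, ((xs ++ [x]).count k : Int)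
        = (xs.count k : Int) + (if k = x then 1 else 0) := by
      intro k
      rw [List.count_append]
      by_cases h : k = x
      · simp [h]
      · have h' : ¬ x = k := fun he => h he.symm
        simp [h, h']
    by_cases hx : x ∈ PySem.Set.ofList xs
    · rw [PySem.Set.add_of_mem hx]
      have hmap : ((PySem.Set.ofList xs).map (fun k => ((xs ++ [x]).count k : Int) * g k))
          = (PySem.Set.ofList xs).map
              (fun k => (xs.count k : Int) * g k + (if k = x then g x else 0)) := by
        apply List.map_congr_left
        intro k _
        rw [hcount k]
        by_cases h : k = x <;> simp [h, add_mul]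
      rw [hmap, PySem.List.sum_map_add_int, ih,
        sum_map_ite_single _ x (g x) (PySem.Set.nodup_ofList xs) hx]
      simp
    · rw [PySem.Set.add_of_not_mem hx]
      have hxxs : x ∉ xs := fun h => hx ((PySem.Set.mem_ofList _ _).mpr h)
      have hmap : ((PySem.Set.ofList xs).map (fun k => ((xs ++ [x]).count k : Int) * g k))
          = (PySem.Set.ofList xs).map (fun k => (xs.count k : Int) * g k) := by
        apply List.map_congr_left
        intro k hk
        have hkx : k ≠ x := fun he => hxxs (he ▸ (PySem.Set.mem_ofList _ _).mp hk)
        rw [hcount k]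
        simp [hkx]
      have hcx : ((xs ++ [x]).count x : Int) = 1 := by
        rw [hcount x]
        simp [List.count_eq_zero_of_not_mem hxxs]
      simp only [List.map_append, List.sum_append, hmap, List.map_cons, List.map_nil]
      rw [ih, hcx]
      simp
  
-- a counting fold with an arbitrary increment is init + a sum
lemma foldl_ite_add (l : List Int) (p : Int → Prop) [DecidablePred p]
    (w : Int → Int) (a : Int) :
    l.foldl (fun acc x => if p x then acc + w x else acc) a
      = a + (l.map (fun x => if p x then w x else 0)).sum := by
  rw [PySem.List.foldl_congr_mem _ _ (fun acc x => acc + (if p x then w x else 0)) a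
    (by intro acc x _; by_cases h : p x <;> simp [h])]
  exact PySem.List.foldl_add l _ a

-- the inner column sum for a fixed row digit sum s
def colSum (t : Int) (cds : List Int) (s : Int) : Int :=
  (cds.map (fun sc => if s + sc ≤ t then (1 : Int) else 0)).sum

-- A's nested fold equals the sum over row digit sums of colSum
lemma fold_A_eq (t : Int) (l1 l2 : List Int) :
    l1.foldl
      (fun count row => l2.foldl
        (fun count col => if digit_sum row + digit_sum col ≤ t then count + 1 else count)
        count) 0
    = ((l1.map digit_sum).map (colSum t (l2.map digit_sum))).sum := by
  have hinner : ∀ (a : Int) (row : Int),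
      l2.foldl (fun count col => if digit_sum row + digit_sum col ≤ t then count + 1 else count) a
        = a + colSum t (l2.map digit_sum) (digit_sum row) := by
    intro a row
    rw [foldl_ite_add l2 (fun col => digit_sum row + digit_sum col ≤ t) (fun _ => 1) a]
    simp [colSum, List.map_map, Function.comp_def]
  rw [PySem.List.foldl_congr_mem _ _
    (fun count row => count + colSum t (l2.map digit_sum) (digit_sum row)) 0
    (by intro acc x _; exact hinner acc x)]
  rw [PySem.List.foldl_add]
  simp [List.map_map, Function.comp_def]

-- B's sum over the counter items of a weighted function equals the plain sum
lemma items_sum (xs : List Int) (g : Int → Int) :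
    ((PySem.Dict.counter xs).items.map (fun p => p.2 * g p.1)).sum = (xs.map g).sum := by
  rw [PySem.Dict.items_counter, List.map_map]
  have : ((fun p : Int × Int => p.2 * g p.1) ∘ fun k => (k, (xs.count k : Int)))
      = fun k => (xs.count k : Int) * g k := rfl
  rw [this, group_sum]

-- B's nested fold over the two counters equals A's double sum
lemma fold_B_eq (t : Int) (rds cds : List Int) :
    (PySem.Dict.counter rds).items.foldl
      (fun count p => (PySem.Dict.counter cds).items.foldl
        (fun count q => if p.1 + q.1 ≤ t then count + p.2 * q.2 else count)
        count) 0
    = (rds.map (colSum t cds)).sum := by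
  have hinner : ∀ (a : Int) (p : Int × Int),
      (PySem.Dict.counter cds).items.foldl
        (fun count q => if p.1 + q.1 ≤ t then count + p.2 * q.2 else count) a
      = a + p.2 * colSum t cds p.1 := by
    intro a p
    rw [PySem.List.foldl_congr_mem _ _
      (fun count q => count + (if p.1 + q.1 ≤ t then p.2 * q.2 else 0)) a
      (by intro acc q _; by_cases h : p.1 + q.1 ≤ t <;> simp [h])]
    rw [PySem.List.foldl_add]
    congr 1
    have : ((PySem.Dict.counter cds).items.map
        (fun q => if p.1 + q.1 ≤ t then p.2 * q.2 else 0)).sum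
        = ((PySem.Dict.counter cds).items.map
            (fun q => q.2 * (if p.1 + q.1 ≤ t then p.2 else 0))).sum := by
      congr 1
      apply List.map_congr_left
      intro q _
      by_cases h : p.1 + q.1 ≤ t <;> simp [h, mul_comm]
    rw [this, items_sum cds (fun sc => if p.1 + sc ≤ t then p.2 else 0)]
    have : (cds.map (fun sc => if p.1 + sc ≤ t then p.2 else 0))
        = cds.map (fun sc => p.2 * (if p.1 + sc ≤ t then 1 else 0)) := by
      apply List.map_congr_left
      intro sc _
      by_cases h : p.1 + sc ≤ t <;> simp [h]
    rw [this, List.sum_map_mul_left, colSum]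
  rw [PySem.List.foldl_congr_mem _ _
    (fun count p => count + p.2 * colSum t cds p.1) 0
    (by intro acc p _; exact hinner acc p)]
  rw [PySem.List.foldl_add]
  simp only [zero_add]
  exact items_sum rds (colSum t cds)

-- ===== VERDICT (by name: the statement is the Claim_ definition above) =====
theorem moving_count2_spec : Claim_equal_moving_count2 := by
  intro t rows cols _
  unfold Spec_moving_count2 moving_count2 moving_count2_alt
  by_cases hg : t < 0 ∨ rows ≤ 0 ∨ cols ≤ 0
  · simp [hg]
  · simp only [hg, if_false]
    have hrow : (PySem.List.pyRange 0 rows 1).foldl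
        (fun d r => let s := digit_sum r; d.insert s (d.getD s 0 + 1)) PySem.Dict.empty
        = PySem.Dict.counter ((PySem.List.pyRange 0 rows 1).map digit_sum) := by
      rw [← PySem.Dict.foldl_insert_getD_add_one_eq_counter, List.foldl_map]
    have hcol : (PySem.List.pyRange 0 cols 1).foldl
        (fun d c => let s := digit_sum c; d.insert s (d.getD s 0 + 1)) PySem.Dict.empty
        = PySem.Dict.counter ((PySem.List.pyRange 0 cols 1).map digit_sum) := by
      rw [← PySem.Dict.foldl_insert_getD_add_one_eq_counter, List.foldl_map]
    rw [hrow, hcol, fold_B_eq, fold_A_eq]
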